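-- pv_equiv track=rewrite | github.com/miliar/Code_Jam_Webscraper | Solutions_python/Problem_200/2731.py | is_tidy
-- ===== SOURCE A (Python) =====
-- def is_tidy(i):
--     last = 9
--     while 0 < i:
--         d = i % 10
--         if last < d:
--             return False
--         else:
--             last = d
--         i = i // 10
--     return True
-- ===== SOURCE B (Python) =====
-- def is_tidy(i):
--     s = str(i)
--     return i <= 0 or s == ''.join(sorted(s))
-- ===== Notes on version B (the rewrite author's own statement) =====
-- stated objective: simpler
-- what changed: Replaces the LSB-to-MSB modulo/floor-division digit scan with a representation change: convert the integer to its decimal string once and compare it with its sorted copy (non-positive inputs return True exactly as A's loop does vacuously).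
import Mathlib
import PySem

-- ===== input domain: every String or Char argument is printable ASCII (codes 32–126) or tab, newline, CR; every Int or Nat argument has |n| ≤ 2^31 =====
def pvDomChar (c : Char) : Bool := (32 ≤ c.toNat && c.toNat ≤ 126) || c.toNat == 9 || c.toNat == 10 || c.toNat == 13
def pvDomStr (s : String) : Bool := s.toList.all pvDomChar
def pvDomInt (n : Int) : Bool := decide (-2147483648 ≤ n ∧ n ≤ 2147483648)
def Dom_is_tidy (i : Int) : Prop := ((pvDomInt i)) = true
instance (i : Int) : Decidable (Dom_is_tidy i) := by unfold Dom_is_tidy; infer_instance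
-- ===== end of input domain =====

-- B replaces A's LSB-to-MSB modulo/floor-division digit scan by a string sort-and-compare
-- (str(i) equals its sorted copy); objective: simpler. Equivalence of the RETURN value is proved.

-- ===== PORT A =====
-- the while-loop of A: state (last, i)
def isTidyLoop (last i : Int) : Bool :=
  if _h : 0 < i then
    let d := PySem.Int.mod i 10
    if last < d then false
    else isTidyLoop d (PySem.Int.floordiv i 10)
  else true
termination_by i.toNat
decreasing_by
  rw [PySem.Int.floordiv_eq_ediv_of_pos (by omega : (0:Int) < 10)]
  omega

def is_tidy (i : Int) : Bool := isTidyLoop 9 i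

-- ===== PORT B =====
def is_tidy_alt (i : Int) : Bool :=
  let s := PySem.Int.toStr i
  decide (i ≤ 0) || (s.toList == PySem.List.sorted s.toList (fun c => c))

-- ===== PRECONDITION & SPEC =====
def Spec_is_tidy (i : Int) (out : Bool) : Prop := out = is_tidy_alt i
instance (i : Int) (out : Bool) : Decidable (Spec_is_tidy i out) := by unfold Spec_is_tidy; infer_instance

-- ===== CLAIM (what is proved, stated in full; the proofs are below) =====
def Claim_equal_is_tidy : Prop := ∀ (i : Int), Dom_is_tidy i → Spec_is_tidy i (is_tidy i)

-- ===== LEMMAS AND PROOFS =====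

lemma digitChar_le_iff {m n : Nat} (hm : m < 10) (hn : n < 10) :
    Nat.digitChar m ≤ Nat.digitChar n ↔ m ≤ n := by
  interval_cases m <;> interval_cases n <;> decide

lemma digit_le_nine {c : Char} (h : c.isDigit = true) : c ≤ '9' := by
  simp [Char.isDigit] at h
  rw [Char.le_def]
  exact h.2

-- characterisation of A's loop on a positive Nat input, for a digit-sized `last`
lemma isTidyLoop_char (n : Nat) (hn : 0 < n) (last : Nat) (hl : last < 10) :
    isTidyLoop (last : Int) (n : Int) = true ↔
      ((Nat.toDigits 10 n).Pairwise (· ≤ ·) ∧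
        ∀ c ∈ Nat.toDigits 10 n, c ≤ Nat.digitChar last) := by
  induction n using Nat.strong_induction_on generalizing last with
  | _ n IH =>
  rw [isTidyLoop]
  have h10 : PySem.Int.mod (n : Int) 10 = ((n % 10 : Nat) : Int) := by
    rw [PySem.Int.mod_eq_emod_of_pos (by omega : (0:Int) < 10)]; omega
  have hdv : PySem.Int.floordiv (n : Int) 10 = ((n / 10 : Nat) : Int) := by
    rw [PySem.Int.floordiv_eq_ediv_of_pos (by omega : (0:Int) < 10)]; omega
  simp only [h10, hdv]
  rw [dif_pos (by exact_mod_cast hn)]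
  by_cases hsmall : n < 10
  · -- one digit
    have hmod : n % 10 = n := Nat.mod_eq_of_lt hsmall
    have hdiv : n / 10 = 0 := Nat.div_eq_of_lt hsmall
    rw [Nat.toDigits_of_lt_base hsmall, hmod, hdiv]
    rw [isTidyLoop]
    rw [dif_neg (by omega)]
    constructor
    · intro h
      have hle : n ≤ last := by
        by_contra hc
        rw [if_pos (by exact_mod_cast (by omega : (last:Int) < n))] at h
        exact absurd h (by simp)
      refine ⟨by simp, ?_⟩
      intro c hc
      simp at hc
      subst hc
      exact (digitChar_le_iff hsmall hl).2 hle
    · rintro ⟨-, h2⟩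
      have := h2 (Nat.digitChar n) (by simp)
      have hle : n ≤ last := (digitChar_le_iff hsmall hl).1 this
      rw [if_neg (by exact_mod_cast (by omega : ¬ ((last:Int) < n)))]
  · -- n ≥ 10: D n = D (n/10) ++ [digitChar (n % 10)]
    have hD : Nat.toDigits 10 n
        = Nat.toDigits 10 (n / 10) ++ [Nat.digitChar (n % 10)] := by
      rw [Nat.toDigits_eq_if (by omega)]
      rw [if_neg hsmall]
    have hm10 : n % 10 < 10 := Nat.mod_lt _ (by omega)
    have hpos : 0 < n / 10 := Nat.div_pos (by omega) (by omega)
    have hIH := IH (n / 10) (Nat.div_lt_self hn (by omega)) hpos (n % 10) hm10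
    rw [hD, List.pairwise_append]
    by_cases hlt : last < n % 10
    · rw [if_pos (by exact_mod_cast hlt)]
      constructor
      · intro h; exact absurd h (by simp)
      · rintro ⟨-, h2⟩
        have := h2 (Nat.digitChar (n % 10)) (by simp)
        have : n % 10 ≤ last := (digitChar_le_iff hm10 hl).1 this
        omega
    · rw [if_neg (by exact_mod_cast hlt)]
      push Not at hlt
      rw [hIH]
      constructor
      · rintro ⟨hp, hall⟩
        have hdc : Nat.digitChar (n % 10) ≤ Nat.digitChar last :=
          (digitChar_le_iff hm10 hl).2 hlt
        refine ⟨⟨hp, by simp, ?_⟩, ?_⟩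
        · intro a ha b hb
          simp at hb; subst hb
          exact hall a ha
        · intro c hc
          rcases (List.mem_append.1 hc) with h | h
          · exact le_trans (hall c h) hdc
          · simp at h; subst h; exact hdc
      · rintro ⟨⟨hp, -, hcross⟩, hall⟩
        refine ⟨hp, ?_⟩
        intro c hc
        exact hcross c hc _ (by simp)

lemma sorted_self_iff (xs : List Char) :
    (xs == PySem.List.sorted xs (fun c => c)) = true ↔ xs.Pairwise (· ≤ ·) := by
  constructor
  · intro h
    rw [beq_iff_eq] at h
    rw [h]
    exact PySem.List.sorted_pairwise xs (fun c => c)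
  · intro h
    rw [beq_iff_eq]
    exact (PySem.List.sorted_eq_self_of_pairwise xs _ h).symm

-- ===== VERDICT (by name: the statement is the Claim_ definition above) =====
theorem is_tidy_spec : Claim_equal_is_tidy := by
  intro i _
  unfold Spec_is_tidy is_tidy
  have halt : is_tidy_alt i = (decide (i ≤ 0) ||
      ((PySem.Int.toStr i).toList ==
        PySem.List.sorted (PySem.Int.toStr i).toList (fun c => c))) := rfl
  rw [halt]
  by_cases hi : i ≤ 0
  · rw [isTidyLoop]
    rw [dif_neg (by omega)]
    simp [hi]
  · push Not at hi
    have hn : 0 < i.toNat := by omega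
    have hcast : ((i.toNat : Nat) : Int) = i := by omega
    have hA := isTidyLoop_char i.toNat hn 9 (by omega)
    rw [hcast, (by norm_num : ((9:Nat):Int) = 9)] at hA
    -- every decimal digit char is ≤ '9' = digitChar 9
    have hnine : ∀ c ∈ Nat.toDigits 10 i.toNat, c ≤ Nat.digitChar 9 := by
      intro c hc
      exact digit_le_nine (Nat.isDigit_of_mem_toDigits (by omega) (by omega) hc)
    have hA' : isTidyLoop 9 i = true ↔ (Nat.toDigits 10 i.toNat).Pairwise (· ≤ ·) := by
      rw [hA]
      exact ⟨fun h => h.1, fun h => ⟨h, hnine⟩⟩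
    have hs : (PySem.Int.toStr i).toList = Nat.toDigits 10 i.toNat := by
      rw [PySem.Int.toList_toStr]
      unfold PySem.Int.toChars
      rw [if_neg (by omega)]
    rw [Bool.eq_iff_iff]
    rw [hA']
    simp only [hs, Bool.or_eq_true, decide_eq_true_eq]
    rw [sorted_self_iff]
    constructor
    · intro h; exact Or.inr h
    · rintro (h | h)
      · omega
      · exact h
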